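-- pv_equiv track=rewrite | github.com/Wave-is/multi-translate | styletts2-ukrainian/infer.py | split_to_parts
-- ===== SOURCE A (Python) =====
-- def split_to_parts(text):
--     split_symbols = '.?!:'
--     parts = ['']
--     index = 0
--     for s in text:
--         parts[index] += s
--         if s in split_symbols and len(parts[index]) > 150:
--             index += 1
--             parts.append('')
--     return parts
-- ===== SOURCE B (Python) =====
-- def split_to_parts(text):
--     split_symbols = '.?!:'
--     cuts = []
--     start = 0
--     for i, s in enumerate(text):
--         if s in split_symbols and i - start + 1 > 150:
--             cuts.append(i + 1)
--             start = i + 1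
--     parts = []
--     prev = 0
--     for c in cuts + [len(text)]:
--         parts.append(text[prev:c])
--         prev = c
--     return parts
-- ===== Notes on version B (the rewrite author's own statement) =====
-- stated objective: faster
-- what changed: B scans once recording integer cut positions (i+1 when a '.?!:' char ends a >150-char run) and then slices the original text between consecutive boundaries, instead of A's growing accumulator strings character by character (quadratic concatenation).
import Mathlib
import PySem

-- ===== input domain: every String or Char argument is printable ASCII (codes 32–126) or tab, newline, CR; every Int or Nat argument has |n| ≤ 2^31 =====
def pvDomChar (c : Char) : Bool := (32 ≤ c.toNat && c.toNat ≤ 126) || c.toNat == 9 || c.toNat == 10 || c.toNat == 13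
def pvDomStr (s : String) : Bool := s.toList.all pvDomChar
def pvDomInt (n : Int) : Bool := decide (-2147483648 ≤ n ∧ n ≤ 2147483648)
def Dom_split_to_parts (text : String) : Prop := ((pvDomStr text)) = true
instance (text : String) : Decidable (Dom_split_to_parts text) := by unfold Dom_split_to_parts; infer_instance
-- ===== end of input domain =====

-- B replaces A's growing-string accumulation with integer cut positions found in one scan,
-- then slices the original text between consecutive boundaries (objective: alternative decomposition).

-- ===== PORT A =====
-- the split symbols '.?!:' as a character list (membership test `s in split_symbols`)
def pvSplitSyms : List Char := ['.', '?', '!', ':']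

-- A's loop: parts is a list of strings (as char lists), parts[index] += s, append '' on cut
def pvALoop : List Char → List (List Char) → Nat → List (List Char)
  | [], parts, _ => parts
  | c :: rest, parts, index =>
    let parts' := parts.set index ((parts.getD index []) ++ [c])
    if pvSplitSyms.contains c ∧ (parts'.getD index []).length > 150 then
      pvALoop rest (parts' ++ [[]]) (index + 1)
    else
      pvALoop rest parts' index

def split_to_parts (text : String) : List String :=
  (pvALoop text.toList [[]] 0).map String.ofList

-- ===== PORT B =====
-- first pass of Source B: enumerate(text), collect cut positions i+1, tracking start
def pvBCuts : List Char → Nat → Nat → List Nat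
  | [], _, _ => []
  | c :: rest, i, start =>
    if pvSplitSyms.contains c ∧ i - start + 1 > 150 then
      (i + 1) :: pvBCuts rest (i + 1) (i + 1)
    else
      pvBCuts rest (i + 1) start

-- second pass of Source B: for c in cuts + [len(text)]: append text[prev:c]; prev = c
-- text[prev:c] with 0 ≤ prev ≤ c ≤ len is exactly (drop prev).take (c - prev) (PySem.List.slice_natCast)
def pvBSlices (full : List Char) (prev : Nat) : List Nat → List (List Char)
  | [] => []
  | c :: cs => ((full.drop prev).take (c - prev)) :: pvBSlices full c cs

def split_to_parts_alt (text : String) : List String :=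
  (pvBSlices text.toList 0 (pvBCuts text.toList 0 0 ++ [text.toList.length])).map String.ofList

-- ===== PRECONDITION & SPEC =====
def Spec_split_to_parts (text : String) (out : List String) : Prop := out = split_to_parts_alt text
instance (text : String) (out : List String) : Decidable (Spec_split_to_parts text out) := by unfold Spec_split_to_parts; infer_instance

-- ===== CLAIM (what is proved, stated in full; the proofs are below) =====
def Claim_equal_split_to_parts : Prop := ∀ (text : String), Dom_split_to_parts text → Spec_split_to_parts text (split_to_parts text)

-- ===== LEMMAS AND PROOFS =====

-- common functional characterization: split with current part cur
def pvSplitRec : List Char → List Char → List (List Char)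
  | [], cur => [cur]
  | c :: rest, cur =>
    if pvSplitSyms.contains c ∧ (cur ++ [c]).length > 150 then
      (cur ++ [c]) :: pvSplitRec rest []
    else
      pvSplitRec rest (cur ++ [c])

theorem pvALoop_eq (cs : List Char) : ∀ (acc : List (List Char)) (cur : List Char),
    pvALoop cs (acc ++ [cur]) acc.length = acc ++ pvSplitRec cs cur := by
  induction cs with
  | nil => intro acc cur; simp [pvALoop, pvSplitRec]
  | cons c rest ih =>
    intro acc cur
    have hset : (acc ++ [cur]).set acc.length (cur ++ [c]) = acc ++ [cur ++ [c]] := by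
      rw [List.set_append_right _ _ (le_refl _)]
      simp
    have hgetD : (acc ++ [cur]).getD acc.length [] = cur := by
      simp [List.getD]
    have hgetD' : (acc ++ [cur ++ [c]]).getD acc.length [] = cur ++ [c] := by
      simp [List.getD]
    simp only [pvALoop, pvSplitRec, hgetD]
    rw [hset]
    by_cases h : pvSplitSyms.contains c ∧ (cur ++ [c]).length > 150
    · rw [if_pos (by simpa [hgetD'] using h), if_pos h]
      have := ih (acc ++ [cur ++ [c]]) []
      simpa using this
    · rw [if_neg (by simpa [hgetD'] using h), if_neg h]
      exact ih acc (cur ++ [c])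

theorem pvB_eq (cs : List Char) : ∀ (full : List Char) (i start : Nat),
    start ≤ i → i ≤ full.length → full.drop i = cs →
    pvBSlices full start (pvBCuts cs i start ++ [full.length]) =
      pvSplitRec cs ((full.drop start).take (i - start)) := by
  induction cs with
  | nil =>
    intro full i start hsi hin hdrop
    have hni : full.length ≤ i := by
      by_contra h
      have := List.drop_eq_nil_iff.mp hdrop
      omega
    have hi : i = full.length := le_antisymm hin hni
    subst hi
    simp [pvBCuts, pvBSlices, pvSplitRec]
  | cons c rest ih =>
    intro full i start hsi hin hdrop
    have hlt : i < full.length := by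
      by_contra h
      rw [List.drop_eq_nil_iff.mpr (by omega)] at hdrop
      exact absurd hdrop (by simp)
    have hget : full[i] = c := by
      have h0 : (full.drop i)[0]'(by rw [hdrop]; simp) = c := by
        simp [hdrop]
      simpa using h0
    have hrest : full.drop (i + 1) = rest := by
      have : (full.drop i).tail = rest := by rw [hdrop]; rfl
      rw [← this, List.tail_drop]
    have hcurlen : ((full.drop start).take (i - start)).length = i - start := by
      simp; omega
    have htake : (full.drop start).take (i - start + 1)
        = (full.drop start).take (i - start) ++ [c] := by
      rw [List.take_add_one]
      congr 1
      have hx : (full.drop start)[i - start]? = some c := by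
        rw [List.getElem?_drop]
        have : start + (i - start) = i := by omega
        rw [this, List.getElem?_eq_getElem hlt, hget]
      simp [hx]
    have hcond : ((full.drop start).take (i - start) ++ [c]).length > 150 ↔ i - start + 1 > 150 := by
      simp [hcurlen]
    simp only [pvBCuts, pvSplitRec]
    by_cases h : pvSplitSyms.contains c ∧ i - start + 1 > 150
    · rw [if_pos h, if_pos ⟨h.1, hcond.mpr h.2⟩]
      simp only [List.cons_append, pvBSlices]
      have h1 : (full.drop start).take (i + 1 - start) = (full.drop start).take (i - start) ++ [c] := by
        have : i + 1 - start = i - start + 1 := by omega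
        rw [this, htake]
      rw [h1]
      congr 1
      have := ih full (i + 1) (i + 1) (le_refl _) (by omega) hrest
      simpa using this
    · rw [if_neg h, if_neg (by rw [hcond]; exact h)]
      have := ih full (i + 1) start (by omega) (by omega) hrest
      rw [this]
      have : i + 1 - start = i - start + 1 := by omega
      rw [this, htake]

-- ===== VERDICT (by name: the statement is the Claim_ definition above) =====
theorem split_to_parts_spec : Claim_equal_split_to_parts := by
  intro text _
  unfold Spec_split_to_parts split_to_parts split_to_parts_alt
  congr 1
  have hA := pvALoop_eq text.toList [] []
  simp at hA
  rw [hA]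
  have hB := pvB_eq text.toList text.toList 0 0 (le_refl _) (by simp) (by simp)
  simpa using hB.symm
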